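-- pv_equiv track=rewrite | github.com/Arescoreadmin/fg-core | admin_gateway/auth/scopes.py | expand_scopes
-- ===== SOURCE A (Python) =====
-- from enum import Enum
-- from typing import Callable, Set
--
-- class Scope(str, Enum):
--     """Authorization scopes for admin operations.
--
--     Scope hierarchy:
--     - console:admin includes all other scopes
--     - *:write includes corresponding *:read
--     """
--
--     # Full admin access
--     CONSOLE_ADMIN = "console:admin"
--
--     # Product management
--     PRODUCT_READ = "product:read"
--     PRODUCT_WRITE = "product:write"
--
--     # API key management
--     KEYS_READ = "keys:read"
--     KEYS_WRITE = "keys:write"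
--
--     # Policy management
--     POLICIES_WRITE = "policies:write"
--
--     # Audit log access
--     AUDIT_READ = "audit:read"
--
-- SCOPE_HIERARCHY: dict[Scope, Set[Scope]] = {
--     Scope.CONSOLE_ADMIN: {
--         Scope.PRODUCT_READ,
--         Scope.PRODUCT_WRITE,
--         Scope.KEYS_READ,
--         Scope.KEYS_WRITE,
--         Scope.POLICIES_WRITE,
--         Scope.AUDIT_READ,
--     },
--     Scope.PRODUCT_WRITE: {Scope.PRODUCT_READ},
--     Scope.KEYS_WRITE: {Scope.KEYS_READ},
-- }
--
-- def expand_scopes(scopes: Set[str]) -> Set[str]: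
--     """Expand scopes based on hierarchy.
--
--     For example, console:admin expands to include all scopes.
--     """
--     expanded = set(scopes)
--
--     for scope_str in list(expanded):
--         try:
--             scope = Scope(scope_str)
--             if scope in SCOPE_HIERARCHY:
--                 expanded.update(s.value for s in SCOPE_HIERARCHY[scope])
--         except ValueError:
--             # Unknown scope, keep as-is
--             pass
--
--     return expanded
-- ===== SOURCE B (Python) =====
-- # Worklist re-implementation: iterate over the (growing) result list to a fixed
-- # point, instead of A's single pass over a frozen snapshot of the input set.
-- def _implied(s):
--     if s == "console:admin":
--         return ["product:read", "product:write", "keys:read",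
--                 "keys:write", "policies:write", "audit:read"]
--     if s == "product:write":
--         return ["product:read"]
--     if s == "keys:write":
--         return ["keys:read"]
--     return []
--
-- def expand_scopes(scopes):
--     out = list(dict.fromkeys(scopes))
--     i = 0
--     while i < len(out):
--         for t in _implied(out[i]):
--             if t not in out:
--                 out.append(t)
--         i += 1
--     return set(out)
-- ===== Notes on version B (the rewrite author's own statement) =====
-- stated objective: alternative
-- what changed: Replaces A's single pass over a frozen snapshot of the input set (enum conversion + try/except + enum-keyed hierarchy dict) with a worklist transitive-closure loop: scan the growing deduplicated result list to a fixed point, appending implied scopes from a plain string-comparison helper; the timing gain is constant-factor, from avoiding per-element Scope(...) enum construction and exception handling.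
import Mathlib
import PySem

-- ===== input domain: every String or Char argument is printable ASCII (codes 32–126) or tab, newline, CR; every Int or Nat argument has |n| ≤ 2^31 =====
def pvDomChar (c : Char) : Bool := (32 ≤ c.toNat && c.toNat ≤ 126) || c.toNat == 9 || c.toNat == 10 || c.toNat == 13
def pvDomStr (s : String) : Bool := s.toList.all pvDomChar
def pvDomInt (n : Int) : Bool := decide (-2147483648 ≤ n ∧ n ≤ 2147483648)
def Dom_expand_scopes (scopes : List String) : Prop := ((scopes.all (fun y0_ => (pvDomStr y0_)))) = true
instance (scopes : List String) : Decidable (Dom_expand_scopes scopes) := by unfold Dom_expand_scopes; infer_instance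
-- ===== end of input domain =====

-- B replaces A's single pass over a frozen snapshot of the input set with a
-- worklist loop scanning the growing result list to a fixed point (objective:
-- alternative; same output on every input).

-- ===== PORT A =====
-- the scopes implied by console:admin (Python iterates SCOPE_HIERARCHY's value
-- sets in hash order; output is a set, so a fixed order is a faithful port)
def impliedAdmin : List String :=
  ["product:read", "product:write", "keys:read", "keys:write", "policies:write", "audit:read"]

-- Scope(scope_str) succeeds exactly on the enum's values
def scopeVals : List String :=
  ["console:admin", "product:read", "product:write", "keys:read", "keys:write", "policies:write", "audit:read"]

def SCOPE_HIERARCHY : PySem.Dict String (List String) :=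
  ⟨[("console:admin", impliedAdmin), ("product:write", ["product:read"]), ("keys:write", ["keys:read"])]⟩

def expand_scopes (scopes : List String) : List String :=
  let expanded := PySem.Set.ofList scopes
  -- for scope_str in list(expanded): try Scope(...) / except ValueError: pass
  expanded.foldl (fun acc s =>
    if scopeVals.contains s then
      match PySem.Dict.get? SCOPE_HIERARCHY s with
      | some l => l.foldl PySem.Set.add acc      -- expanded.update(...)
      | none => acc
    else acc) expanded

-- ===== PORT B =====
def impliedB (s : String) : List String :=
  if s = "console:admin" then impliedAdmin
  else if s = "product:write" then ["product:read"]
  else if s = "keys:write" then ["keys:read"]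
  else []

-- termination measure helpers for the while loop (appended scopes all come
-- from impliedAdmin and are new, so the measure strictly decreases)
def mCount (out : List String) : Nat := impliedAdmin.countP (fun t => !out.contains t)

lemma countP_succ_le {α : Type} {x : α} {l : List α} {p q : α → Bool}
    (hx : x ∈ l) (himp : ∀ a, q a = true → p a = true)
    (hpx : p x = true) (hqx : q x = false) : l.countP q + 1 ≤ l.countP p := by
  induction l with
  | nil => cases hx
  | cons h t ih =>
    rcases List.mem_cons.mp hx with rfl | hmem
    · simp [hpx, hqx]
      have := List.countP_mono_left (l := t) (p := q) (q := p) (fun a _ => himp a)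
      omega
    · have := ih hmem
      by_cases hq : q h = true
      · simp [hq, himp h hq]; omega
      · simp at hq
        have h2 : List.countP q (h :: t) = List.countP q t := by
          simp [hq]
        have h3 : List.countP p t ≤ List.countP p (h :: t) := by
          rw [List.countP_cons]; omega
        omega

lemma mCount_add_le (out : List String) (x : String) (hx : x ∈ impliedAdmin) :
    2 * mCount (PySem.Set.add out x) + (PySem.Set.add out x).length ≤ 2 * mCount out + out.length := by
  by_cases hmem : x ∈ out
  · rw [PySem.Set.add_of_mem hmem]
  · rw [PySem.Set.add_of_not_mem hmem]
    unfold mCount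
    have h1 : (impliedAdmin.countP (fun t => !(out ++ [x]).contains t)) + 1 ≤
        impliedAdmin.countP (fun t => !out.contains t) := by
      apply countP_succ_le hx
      · intro a ha
        simp at ha ⊢
        exact fun h => ha.1 h
      · simpa using hmem
      · simp
    simp only [List.length_append, List.length_singleton]
    omega

lemma q_fold (l : List String) (out : List String) (hl : ∀ x ∈ l, x ∈ impliedAdmin) :
    2 * mCount (l.foldl PySem.Set.add out) + (l.foldl PySem.Set.add out).length ≤
      2 * mCount out + out.length := by
  induction l generalizing out with
  | nil => simp
  | cons h t ih =>
    simp only [List.foldl_cons]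
    exact le_trans (ih _ (fun x hx => hl x (List.mem_cons_of_mem _ hx)))
      (mCount_add_le out h (hl h (List.mem_cons_self)))

lemma impliedB_sub (s : String) : ∀ x ∈ impliedB s, x ∈ impliedAdmin := by
  intro x hx
  unfold impliedB at hx
  split_ifs at hx
  · exact hx
  · simp at hx; subst hx; decide
  · simp at hx; subst hx; decide
  · cases hx

-- while i < len(out): for t in _implied(out[i]): if t not in out: out.append(t); i += 1
def bLoop (out : List String) (i : Nat) : List String :=
  if h : i < out.length then
    bLoop ((impliedB out[i]).foldl PySem.Set.add out) (i + 1)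
  else out
termination_by 2 * mCount out + out.length - i
decreasing_by
  have := q_fold (impliedB out[i]) out (impliedB_sub out[i])
  omega

def expand_scopes_alt (scopes : List String) : List String :=
  bLoop (PySem.Set.ofList scopes) 0    -- out = list(dict.fromkeys(scopes)); returned as set(out)

-- ===== PRECONDITION & SPEC =====
def Spec_expand_scopes (scopes : List String) (out : List String) : Prop := out = expand_scopes_alt scopes
instance (scopes : List String) (out : List String) : Decidable (Spec_expand_scopes scopes out) := by unfold Spec_expand_scopes; infer_instance

-- ===== CLAIM (what is proved, stated in full; the proofs are below) =====
def Claim_equal_expand_scopes : Prop := ∀ (scopes : List String), Dom_expand_scopes scopes → Spec_expand_scopes scopes (expand_scopes scopes)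

-- ===== LEMMAS AND PROOFS =====

-- A's per-element update equals B's (string-keyed) per-element update
def stepF (acc : List String) (s : String) : List String := (impliedB s).foldl PySem.Set.add acc

lemma stepA_eq_stepF : (fun (acc : List String) (s : String) =>
    if scopeVals.contains s then
      match PySem.Dict.get? SCOPE_HIERARCHY s with
      | some l => l.foldl PySem.Set.add acc
      | none => acc
    else acc) = stepF := by
  funext acc s
  by_cases h1 : s = "console:admin"
  · subst h1; rfl
  · by_cases h2 : s = "product:write"
    · subst h2; rfl
    · by_cases h3 : s = "keys:write"
      · subst h3; rfl
      · have hg : PySem.Dict.get? SCOPE_HIERARCHY s = none := by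
          have e1 : ("console:admin" == s) = false := by
            rw [beq_eq_false_iff_ne]; exact fun he => h1 he.symm
          have e2 : ("product:write" == s) = false := by
            rw [beq_eq_false_iff_ne]; exact fun he => h2 he.symm
          have e3 : ("keys:write" == s) = false := by
            rw [beq_eq_false_iff_ne]; exact fun he => h3 he.symm
          simp [SCOPE_HIERARCHY, PySem.Dict.get?, List.find?, e1, e2, e3]
        have hb : impliedB s = [] := by simp [impliedB, h1, h2, h3]
        simp only [stepF, hg, hb, List.foldl_nil]
        split <;> rfl

-- membership facts about foldl Set.add
lemma mem_foldl_add_left {y : String} {out l : List String} (hy : y ∈ out) :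
    y ∈ l.foldl PySem.Set.add out := by
  induction l generalizing out with
  | nil => exact hy
  | cons h t ih =>
    simp only [List.foldl_cons]
    exact ih (by rw [PySem.Set.mem_add]; exact Or.inl hy)

lemma mem_foldl_add_right {y : String} {out l : List String} (hy : y ∈ l) :
    y ∈ l.foldl PySem.Set.add out := by
  induction l generalizing out with
  | nil => cases hy
  | cons h t ih =>
    simp only [List.foldl_cons]
    rcases List.mem_cons.mp hy with rfl | hm
    · exact mem_foldl_add_left (by rw [PySem.Set.mem_add]; exact Or.inr rfl)
    · exact ih hm

lemma foldl_add_of_subset {out l : List String} (h : ∀ x ∈ l, x ∈ out) :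
    l.foldl PySem.Set.add out = out := by
  induction l with
  | nil => rfl
  | cons x t ih =>
    simp only [List.foldl_cons]
    rw [PySem.Set.add_of_mem (h x List.mem_cons_self)]
    exact ih (fun x hx => h x (List.mem_cons_of_mem _ hx))

lemma foldl_add_decomp (l out : List String) :
    ∃ e, l.foldl PySem.Set.add out = out ++ e ∧ ∀ x ∈ e, x ∈ l := by
  induction l generalizing out with
  | nil => exact ⟨[], by simp⟩
  | cons h t ih =>
    simp only [List.foldl_cons]
    by_cases hm : h ∈ out
    · rw [PySem.Set.add_of_mem hm]
      rcases ih out with ⟨e, he, hsub⟩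
      exact ⟨e, he, fun x hx => List.mem_cons_of_mem _ (hsub x hx)⟩
    · rw [PySem.Set.add_of_not_mem hm]
      rcases ih (out ++ [h]) with ⟨e, he, hsub⟩
      refine ⟨h :: e, by rw [he, List.append_assoc]; rfl, ?_⟩
      intro x hx
      rcases List.mem_cons.mp hx with rfl | hx
      · exact List.mem_cons_self
      · exact List.mem_cons_of_mem _ (hsub x hx)

-- the hierarchy is transitively closed
lemma impliedB_trans (s x : String) (hx : x ∈ impliedB s) : ∀ y ∈ impliedB x, y ∈ impliedB s := by
  unfold impliedB at hx
  split_ifs at hx with h1 h2 h3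
  · subst h1; fin_cases hx <;> decide
  · subst h2; simp at hx; subst hx; decide
  · subst h3; simp at hx; subst hx; decide
  · cases hx

-- out = base ++ extra where every extra element has its implications inside out
def GoodExt (base out : List String) : Prop :=
  ∃ extra, out = base ++ extra ∧ ∀ x ∈ extra, ∀ y ∈ impliedB x, y ∈ out

lemma goodExt_step {base out : List String} (h : GoodExt base out) (s : String) :
    GoodExt base (stepF out s) := by
  rcases h with ⟨extra, rfl, hcl⟩
  rcases foldl_add_decomp (impliedB s) (base ++ extra) with ⟨e, he, hsub⟩
  have he' : stepF (base ++ extra) s = base ++ extra ++ e := he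
  refine ⟨extra ++ e, by rw [he', List.append_assoc], ?_⟩
  intro x hx y hy
  rw [he']
  rcases List.mem_append.mp hx with hx | hx
  · exact List.mem_append_left _ (hcl x hx y hy)
  · rw [← he']
    exact mem_foldl_add_right (impliedB_trans s x (hsub x hx) y hy)

lemma goodExt_fold (base : List String) (pre : List String) :
    GoodExt base (pre.foldl stepF base) := by
  induction pre using List.reverseRecOn with
  | nil => exact ⟨[], by simp⟩
  | append_singleton t s ih => rw [List.foldl_append, List.foldl_cons, List.foldl_nil]; exact goodExt_step ih s

lemma bLoop_noop (out : List String) (i : Nat) :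
    (∀ j, i ≤ j → (hj : j < out.length) → stepF out out[j] = out) →
    bLoop out i = out := by
  induction out, i using bLoop.induct with
  | case1 out i hlt ih =>
    intro h
    have hstep : (impliedB out[i]).foldl PySem.Set.add out = out := h i le_rfl hlt
    rw [bLoop, dif_pos hlt, hstep]
    rw [hstep] at ih
    exact ih (fun j hj hjl => h j (Nat.le_of_succ_le hj) hjl)
  | case2 out i hlt =>
    intro _
    rw [bLoop, dif_neg hlt]

lemma length_fold_ge (base pre : List String) : base.length ≤ (pre.foldl stepF base).length := by
  rcases goodExt_fold base pre with ⟨extra, heq, -⟩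
  rw [heq]; simp

lemma bLoop_phase (s0 : List String) : ∀ (d i : Nat), i + d = s0.length →
    bLoop ((s0.take i).foldl stepF s0) i = s0.foldl stepF s0 := by
  intro d
  induction d with
  | zero =>
    intro i hi
    have hi' : i = s0.length := by omega
    subst hi'
    rw [List.take_length]
    apply bLoop_noop
    intro j hj hjl
    rcases goodExt_fold s0 s0 with ⟨extra, heq, hcl⟩
    have hlen : s0.length ≤ j := hj
    have hx : (s0.foldl stepF s0)[j] ∈ extra := by
      have hjl' : j < (s0 ++ extra).length := by rw [heq] at hjl; exact hjl
      have hlt2 : j - s0.length < extra.length := by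
        rw [List.length_append] at hjl'; omega
      have hge : (s0 ++ extra)[j]'hjl' = extra[j - s0.length]'hlt2 :=
        List.getElem_append_right hlen
      have : (s0.foldl stepF s0)[j] = extra[j - s0.length]'hlt2 := by
        rw [← hge]
        congr 1
      rw [this]
      exact List.getElem_mem _
    apply foldl_add_of_subset
    intro y hy
    exact hcl _ hx y hy
  | succ d ih =>
    intro i hi
    have hilt : i < s0.length := by omega
    have hWlen : i < ((s0.take i).foldl stepF s0).length :=
      lt_of_lt_of_le hilt (length_fold_ge s0 _)
    rw [bLoop, dif_pos hWlen]
    have hWi : ((s0.take i).foldl stepF s0)[i] = s0[i] := by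
      rcases goodExt_fold s0 (s0.take i) with ⟨extra, heq, -⟩
      have hgl : (s0 ++ extra)[i]'(by simp; omega) = s0[i] :=
        List.getElem_append_left hilt
      rw [← hgl]
      congr 1
    have hW : (impliedB ((s0.take i).foldl stepF s0)[i]).foldl PySem.Set.add
        ((s0.take i).foldl stepF s0) = (s0.take (i+1)).foldl stepF s0 := by
      rw [hWi]
      rw [List.take_add_one, List.getElem?_eq_getElem hilt]
      rw [List.foldl_append]
      rfl
    rw [hW]
    exact ih (i+1) (by omega)

theorem main_eq (scopes : List String) : expand_scopes scopes = expand_scopes_alt scopes := by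
  unfold expand_scopes expand_scopes_alt
  rw [stepA_eq_stepF]
  exact ((bLoop_phase (PySem.Set.ofList scopes) (PySem.Set.ofList scopes).length 0 (by simp)).trans rfl).symm

-- ===== VERDICT (by name: the statement is the Claim_ definition above) =====
theorem expand_scopes_spec : Claim_equal_expand_scopes := by
  intro scopes _
  unfold Spec_expand_scopes
  exact main_eq scopes
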